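-- pv_equiv track=rewrite | github.com/crispyfunicular/perso | pluriTAL/oralite/projet_final/extract_units_from_mfa.py | ngram_hits_with_context
-- ===== SOURCE A (Python) =====
-- from typing import Iterable, Iterator, List, Sequence, Tuple
--
-- def ngram_hits_with_context(
--     tokens: Sequence[str], ngram: Tuple[str, ...], context: int = 3
-- ) -> List[Tuple[int, str]]:
--     """
--     Return list of (start_index_in_segment, context_string) for each hit of ngram
--     inside pause-delimited segments. The index is relative to the segment (no '|').
--     """
--     hits: List[Tuple[int, str]] = []
--     seg: List[str] = []
--
--     def scan_segment(segment: List[str]) -> None: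
--         n = len(ngram)
--         if len(segment) < n:
--             return
--         for i in range(0, len(segment) - n + 1):
--             if tuple(segment[i : i + n]) == ngram:
--                 left = max(0, i - context)
--                 right = min(len(segment), i + n + context)
--                 snippet = " ".join(segment[left:right])
--                 hits.append((i, snippet))
--
--     for t in tokens:
--         if t == "|":
--             if seg:
--                 scan_segment(seg)
--             seg = []
--         else:
--             seg.append(t)
--     if seg:
--         scan_segment(seg)
--     return hits
-- ===== SOURCE B (Python) =====
-- def _fp(t):
--     # cheap fingerprint of a token: its length
--     return len(t)
--
-- def ngram_hits_with_context(tokens, ngram, context=3):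
--     n = len(ngram)
--     pat = list(ngram)
--     target = sum(_fp(t) for t in pat)
--     # phase 1: split the token stream into pause-delimited segments
--     segments = []
--     seg = []
--     for t in tokens:
--         if t == "|":
--             if seg:
--                 segments.append(seg)
--             seg = []
--         else:
--             seg.append(t)
--     if seg:
--         segments.append(seg)
--     # phase 2: per segment, rolling-fingerprint filter (prefix sums), verify candidates
--     hits = []
--     for seg in segments:
--         L = len(seg)
--         if L < n:
--             continue
--         pre = [0]
--         for t in seg:
--             pre.append(pre[-1] + _fp(t))
--         for i in range(L - n + 1):
--             if pre[i + n] - pre[i] == target and seg[i:i + n] == pat: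
--                 left = max(0, i - context)
--                 right = min(L, i + n + context)
--                 hits.append((i, " ".join(seg[left:right])))
--     return hits
-- ===== Notes on version B (the rewrite author's own statement) =====
-- stated objective: alternative
-- what changed: B first splits the token stream into a list of pause-delimited segments, then scans each segment filter-then-verify: a prefix-sum length fingerprint gives an O(1) window check per position and the window itself is compared only on fingerprint hits, instead of A's interleaved closure that builds and compares a tuple slice at every position.
import Mathlib
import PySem

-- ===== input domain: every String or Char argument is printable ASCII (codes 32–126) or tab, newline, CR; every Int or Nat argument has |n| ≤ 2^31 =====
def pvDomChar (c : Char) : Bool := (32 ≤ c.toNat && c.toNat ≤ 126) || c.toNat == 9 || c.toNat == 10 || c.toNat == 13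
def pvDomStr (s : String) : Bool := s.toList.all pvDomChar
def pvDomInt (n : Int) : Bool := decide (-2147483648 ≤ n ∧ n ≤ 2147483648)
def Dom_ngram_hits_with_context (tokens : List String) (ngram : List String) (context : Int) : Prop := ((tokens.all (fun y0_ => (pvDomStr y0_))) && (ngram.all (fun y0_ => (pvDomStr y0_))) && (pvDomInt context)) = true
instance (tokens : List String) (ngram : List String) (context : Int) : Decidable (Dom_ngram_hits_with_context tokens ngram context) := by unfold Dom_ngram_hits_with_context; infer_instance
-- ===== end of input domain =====

-- B splits the stream into a segment list first and, per segment, filters candidate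
-- positions with a prefix-sum length fingerprint before verifying the window;
-- objective: alternative (a filter-then-verify scan of the same cost; not measured faster).

-- ===== PORT A =====
-- scan_segment: per-position window comparison, appending hits
def pvScanSegA (ngram : List String) (context : Int) (segment : List String) : List (Int × String) :=
  let n : Int := ngram.length
  if (segment.length : Int) < n then []
  else
    (PySem.List.pyRange 0 ((segment.length : Int) - n + 1) 1).foldl
      (fun hits i =>
        if PySem.List.slice segment (some i) (some (i + n)) = ngram then
          let left := max 0 (i - context)
          let right := min ((segment.length : Int)) (i + n + context)
          hits ++ [(i, PySem.Str.join " " (PySem.List.slice segment (some left) (some right)))]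
        else hits) []

def ngram_hits_with_context (tokens : List String) (ngram : List String) (context : Int) : List (Int × String) :=
  let st := tokens.foldl
    (fun (st : List (Int × String) × List String) t =>
      if t = "|" then
        (if st.2 ≠ [] then st.1 ++ pvScanSegA ngram context st.2 else st.1, [])
      else (st.1, st.2 ++ [t]))
    ([], [])
  if st.2 ≠ [] then st.1 ++ pvScanSegA ngram context st.2 else st.1

-- ===== PORT B =====
def pvFp (t : String) : Int :=
  PySem.Str.len t

-- phase 1 of B: split the token stream into pause-delimited segments
def pvSegments (tokens : List String) : List (List String) :=
  let st := tokens.foldl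
    (fun (st : List (List String) × List String) t =>
      if t = "|" then (if st.2 ≠ [] then st.1 ++ [st.2] else st.1, [])
      else (st.1, st.2 ++ [t]))
    ([], [])
  if st.2 ≠ [] then st.1 ++ [st.2] else st.1

-- pre = [0]; for t in seg: pre.append(pre[-1] + _fp(t))
def pvPre (seg : List String) : List Int :=
  seg.foldl (fun pre t => pre ++ [pre.getLast! + pvFp t]) [0]

-- phase 2 of B on one segment: prefix-sum fingerprint filter, then verify
def pvScanSegB (pat : List String) (target : Int) (context : Int) (seg : List String) : List (Int × String) :=
  let n : Int := pat.length
  let L : Int := seg.length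
  if L < n then []
  else
    let pre := pvPre seg
    (PySem.List.pyRange 0 (L - n + 1) 1).foldl
      (fun hits i =>
        if PySem.List.pyGetD pre (i + n) 0 - PySem.List.pyGetD pre i 0 = target
            ∧ PySem.List.slice seg (some i) (some (i + n)) = pat then
          hits ++ [(i, PySem.Str.join " "
            (PySem.List.slice seg (some (max 0 (i - context))) (some (min L (i + n + context)))))]
        else hits) []

def ngram_hits_with_context_alt (tokens : List String) (ngram : List String) (context : Int) : List (Int × String) :=
  let target := (ngram.map pvFp).sum
  (pvSegments tokens).foldl (fun hits seg => hits ++ pvScanSegB ngram target context seg) []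

-- ===== PRECONDITION & SPEC =====
def Spec_ngram_hits_with_context (tokens : List String) (ngram : List String) (context : Int) (out : List (Int × String)) : Prop := out = ngram_hits_with_context_alt tokens ngram context
instance (tokens : List String) (ngram : List String) (context : Int) (out : List (Int × String)) : Decidable (Spec_ngram_hits_with_context tokens ngram context out) := by unfold Spec_ngram_hits_with_context; infer_instance

-- ===== CLAIM (what is proved, stated in full; the proofs are below) =====
def Claim_equal_ngram_hits_with_context : Prop := ∀ (tokens : List String) (ngram : List String) (context : Int), Dom_ngram_hits_with_context tokens ngram context → Spec_ngram_hits_with_context tokens ngram context (ngram_hits_with_context tokens ngram context)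

-- ===== LEMMAS AND PROOFS =====

-- the list of pause-delimited segments, structurally (proof-side spec)
def pvSegsOf (seg : List String) : List String → List (List String)
  | [] => if seg = [] then [] else [seg]
  | t :: ts => if t = "|" then (if seg = [] then [] else [seg]) ++ pvSegsOf [] ts
               else pvSegsOf (seg ++ [t]) ts

-- pvPre is the list of prefix sums of the fingerprints
theorem pvPre_aux (seg : List String) : ∀ (pre : List Int) (s : Int), pre.getLast? = some s →
    seg.foldl (fun pre t => pre ++ [pre.getLast! + pvFp t]) pre
      = pre ++ (List.range seg.length).map (fun k => s + (((seg.take (k+1)).map pvFp).sum)) := by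
  induction seg with
  | nil => simp
  | cons t ts ih =>
    intro pre s hs
    have hne : pre ≠ [] := by rintro rfl; simp at hs
    have hlast : pre.getLast! = s := by
      rw [List.getLast!_eq_getLast?_getD, hs]; rfl
    simp only [List.foldl_cons, hlast]
    rw [ih (pre ++ [s + pvFp t]) (s + pvFp t) (by simp)]
    rw [List.length_cons, List.range_succ_eq_map]
    simp [List.append_assoc, Function.comp, add_assoc]

theorem pvPre_eq (seg : List String) :
    pvPre seg = (List.range (seg.length + 1)).map (fun k => ((seg.take k).map pvFp).sum) := by
  unfold pvPre
  rw [pvPre_aux seg [0] 0 (by simp)]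
  rw [List.range_succ_eq_map]
  simp [Function.comp]

theorem pvPre_getD (seg : List String) (k : Nat) (hk : k ≤ seg.length) :
    PySem.List.pyGetD (pvPre seg) (k : Int) 0 = ((seg.take k).map pvFp).sum := by
  rw [pvPre_eq, PySem.List.pyGetD_natCast]
  rw [List.getD_eq_getElem?_getD, List.getElem?_map, List.getElem?_range (by omega)]
  rfl

-- slice = pat implies the fingerprint window sum hits the target
theorem pvFilter_sound (seg pat : List String) (i : Int) (hi : 0 ≤ i)
    (hin : i + pat.length ≤ (seg.length : Int))
    (hs : PySem.List.slice seg (some i) (some (i + pat.length)) = pat) :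
    PySem.List.pyGetD (pvPre seg) (i + pat.length) 0 - PySem.List.pyGetD (pvPre seg) i 0
      = (pat.map pvFp).sum := by
  lift i to Nat using hi with j
  rw [PySem.List.slice_natCast_add] at hs
  have hcast : ((j : Int) + (pat.length : Int)) = (((j + pat.length : Nat) : Nat) : Int) := by push_cast; ring
  rw [hcast, pvPre_getD seg _ (by omega), pvPre_getD seg j (by omega)]
  have htake : seg.take (j + pat.length) = seg.take j ++ (seg.drop j).take pat.length := by
    rw [List.take_add, List.take_drop]
  rw [htake, hs]
  simp

-- per-segment: B's filtered scan returns exactly A's scan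
theorem scanSeg_eq (ngram : List String) (context : Int) (seg : List String) :
    pvScanSegB ngram ((ngram.map pvFp).sum) context seg = pvScanSegA ngram context seg := by
  unfold pvScanSegA pvScanSegB
  by_cases hL : ((seg.length : Int) < (ngram.length : Int))
  · simp [hL]
  · simp only [hL, ite_false]
    apply PySem.List.foldl_congr_mem
    intro acc i hi
    rw [PySem.List.mem_pyRange_one] at hi
    by_cases hs : PySem.List.slice seg (some i) (some (i + (ngram.length : Int))) = ngram
    · rw [if_pos ⟨pvFilter_sound seg ngram i hi.1 (by omega) hs, hs⟩, if_pos hs]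
    · rw [if_neg (fun h => hs h.2), if_neg hs]

-- finalizers of the two interleaved folds (proof-side abbreviations, in if-normal form)
def pvFinA (ngram : List String) (context : Int) (st : List (Int × String) × List String) : List (Int × String) :=
  if st.2 = [] then st.1 else st.1 ++ pvScanSegA ngram context st.2

def pvFinB (st : List (List String) × List String) : List (List String) :=
  if st.2 = [] then st.1 else st.1 ++ [st.2]

-- A's interleaved fold, finalized: hits ++ flatMap of scans over the segments
theorem A_aux (ngram : List String) (context : Int) :
    ∀ (ts : List String) (hits : List (Int × String)) (seg : List String),
    pvFinA ngram context (ts.foldl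
        (fun (st : List (Int × String) × List String) t =>
          if t = "|" then
            (if st.2 = [] then st.1 else st.1 ++ pvScanSegA ngram context st.2, [])
          else (st.1, st.2 ++ [t])) (hits, seg))
      = hits ++ (pvSegsOf seg ts).flatMap (pvScanSegA ngram context) := by
  intro ts
  induction ts with
  | nil =>
    intro hits seg
    by_cases h : seg = [] <;> simp [pvFinA, pvSegsOf, h]
  | cons t ts ih =>
    intro hits seg
    rw [List.foldl_cons]
    by_cases ht : t = "|"
    · by_cases h : seg = []
      · simp only [ht, h, ite_true]
        rw [ih]
        simp [pvSegsOf]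
      · simp only [ht, h, ite_false]
        rw [ih]
        simp [pvSegsOf, h, List.append_assoc]
    · simp only [if_neg ht]
      rw [ih]
      simp [pvSegsOf, ht]

-- B's segment-collecting fold, finalized: equals pvSegsOf
theorem B_aux :
    ∀ (ts : List String) (sgs : List (List String)) (seg : List String),
    pvFinB (ts.foldl
        (fun (st : List (List String) × List String) t =>
          if t = "|" then (if st.2 = [] then st.1 else st.1 ++ [st.2], [])
          else (st.1, st.2 ++ [t])) (sgs, seg))
      = sgs ++ pvSegsOf seg ts := by
  intro ts
  induction ts with
  | nil =>
    intro sgs seg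
    by_cases h : seg = [] <;> simp [pvFinB, pvSegsOf, h]
  | cons t ts ih =>
    intro sgs seg
    rw [List.foldl_cons]
    by_cases ht : t = "|"
    · by_cases h : seg = []
      · simp only [ht, h, ite_true]
        rw [ih]
        simp [pvSegsOf]
      · simp only [ht, h, ite_false]
        rw [ih]
        simp [pvSegsOf, h, List.append_assoc]
    · simp only [if_neg ht]
      rw [ih]
      simp [pvSegsOf, ht]

-- ===== VERDICT (by name: the statement is the Claim_ definition above) =====
theorem ngram_hits_with_context_spec : Claim_equal_ngram_hits_with_context := by
  intro tokens ngram context _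
  unfold Spec_ngram_hits_with_context
  unfold ngram_hits_with_context ngram_hits_with_context_alt pvSegments
  simp only [ne_eq, ite_not]
  rw [PySem.List.foldl_append_eq_flatMap]
  have hA := A_aux ngram context tokens [] []
  have hB := B_aux tokens [] []
  unfold pvFinA at hA
  unfold pvFinB at hB
  rw [hA, hB]
  simp only [List.nil_append]
  exact (List.flatMap_congr (fun seg _ => (scanSeg_eq ngram context seg))).symm
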